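-- pv_equiv track=rewrite | github.com/aidenwalker1/ema_analysis | stat_features.py | zero_crossings
-- ===== SOURCE A (Python) =====
-- def zero_crossings(data, median):
--     """ Compute zero crossings of the input array of data. Zero crossings is
--     computed as the number of times the data value crosses the median as the
--     sequence is traversed from beginning to end.
--     """
--     rel = 0
--     count = 0
--
--     for x in data:
--         if x < median:
--             if rel > 0:
--                 count += 1
--             rel = -1
--         elif x > median:
--             if rel < 0:
--                 count += 1
--             rel = 1
--         else:
--             rel = 0
--     return count
-- ===== SOURCE B (Python) =====
-- def zero_crossings(data, median):
--     signs = [(x > median) - (x < median) for x in data]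
--     return sum(1 for a, b in zip(signs, signs[1:]) if a * b == -1)
-- ===== Notes on version B (the rewrite author's own statement) =====
-- stated objective: simpler
-- what changed: Replaces the fused rel/count state machine with two passes: map each point to its sign (-1/0/+1) relative to the median, then count adjacent sign pairs whose product is -1.
import Mathlib
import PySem

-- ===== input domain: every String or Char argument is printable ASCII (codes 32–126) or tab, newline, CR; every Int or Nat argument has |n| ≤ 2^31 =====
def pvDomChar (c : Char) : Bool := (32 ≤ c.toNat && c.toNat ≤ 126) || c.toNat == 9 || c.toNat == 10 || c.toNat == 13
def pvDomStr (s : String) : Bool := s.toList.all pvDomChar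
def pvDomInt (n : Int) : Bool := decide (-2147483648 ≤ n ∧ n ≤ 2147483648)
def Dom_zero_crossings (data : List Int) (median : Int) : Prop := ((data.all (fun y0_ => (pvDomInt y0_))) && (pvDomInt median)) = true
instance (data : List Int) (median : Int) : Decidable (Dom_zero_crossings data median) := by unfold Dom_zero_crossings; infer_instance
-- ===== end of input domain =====

-- B replaces A's fused rel/count state machine by two passes: map to signs, then count
-- adjacent opposite-sign pairs (objective: simpler decomposition, same cost).

-- ===== PORT A =====
-- the for-loop over data carrying (rel, count)
def zero_crossings (data : List Int) (median : Int) : Int :=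
  (data.foldl
    (fun (st : Int × Int) x =>
      if x < median then
        (-1, if st.1 > 0 then st.2 + 1 else st.2)
      else if x > median then
        (1, if st.1 < 0 then st.2 + 1 else st.2)
      else
        (0, st.2))
    (0, 0)).2

-- ===== PORT B =====
-- signs = [(x > median) - (x < median) for x in data]
def pySign (median x : Int) : Int :=
  (if x > median then (1 : Int) else 0) - (if x < median then (1 : Int) else 0)

-- sum(1 for a, b in zip(signs, signs[1:]) if a * b == -1)
def zero_crossings_alt (data : List Int) (median : Int) : Int :=
  let signs := data.map (pySign median)
  (signs.zip signs.tail).foldl (fun c p => if p.1 * p.2 = -1 then c + 1 else c) 0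

-- ===== PRECONDITION & SPEC =====
def Spec_zero_crossings (data : List Int) (median : Int) (out : Int) : Prop := out = zero_crossings_alt data median
instance (data : List Int) (median : Int) (out : Int) : Decidable (Spec_zero_crossings data median out) := by unfold Spec_zero_crossings; infer_instance

-- ===== CLAIM (what is proved, stated in full; the proofs are below) =====
def Claim_equal_zero_crossings : Prop := ∀ (data : List Int) (median : Int), Dom_zero_crossings data median → Spec_zero_crossings data median (zero_crossings data median)

-- ===== LEMMAS AND PROOFS =====

-- crossing count of a sign list: adjacent pairs with product -1
def cc : List Int → Int
  | a :: b :: t => (if a * b = -1 then 1 else 0) + cc (b :: t)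
  | _ => 0

theorem b_fold_eq_cc (l : List Int) (c : Int) :
    (l.zip l.tail).foldl (fun c p => if p.1 * p.2 = -1 then c + 1 else c) c = c + cc l := by
  induction l generalizing c with
  | nil => simp [cc]
  | cons a t ih =>
    cases t with
    | nil => simp [cc]
    | cons b t' =>
      have hz : ((a :: b :: t').zip (a :: b :: t').tail)
          = (a, b) :: ((b :: t').zip (b :: t').tail) := rfl
      rw [hz, List.foldl_cons, ih]
      simp only [cc]
      split_ifs <;> ring

theorem a_fold_eq_cc (median : Int) (data : List Int) (r c : Int)
    (hr : r = -1 ∨ r = 0 ∨ r = 1) :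
    (data.foldl
      (fun (st : Int × Int) x =>
        if x < median then
          (-1, if st.1 > 0 then st.2 + 1 else st.2)
        else if x > median then
          (1, if st.1 < 0 then st.2 + 1 else st.2)
        else
          (0, st.2))
      (r, c)).2 = c + cc (r :: data.map (pySign median)) := by
  induction data generalizing r c with
  | nil => simp [cc]
  | cons x t ih =>
    simp only [List.foldl_cons, List.map_cons]
    have hs : pySign median x = -1 ∨ pySign median x = 0 ∨ pySign median x = 1 := by
      unfold pySign; split_ifs <;> simp
    rcases lt_trichotomy x median with h | h | h
    · have h2 : ¬ x > median := by omega
      simp only [if_pos h]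
      rw [ih (-1) _ (Or.inl rfl)]
      simp only [cc, pySign, if_pos h, if_neg h2]
      rcases hr with h' | h' | h' <;> subst h' <;> norm_num <;> ring
    · subst h
      simp only [lt_irrefl, ite_false]
      rw [ih 0 _ (Or.inr (Or.inl rfl))]
      simp only [cc, pySign, lt_irrefl, ite_false]
      rcases hr with h' | h' | h' <;> subst h' <;> norm_num <;> ring
    · have h1 : ¬ x < median := by omega
      simp only [if_neg h1, if_pos h]
      rw [ih 1 _ (Or.inr (Or.inr rfl))]
      simp only [cc, pySign, if_pos h, if_neg h1]
      rcases hr with h' | h' | h' <;> subst h' <;> norm_num <;> ring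

theorem cc_zero_cons (l : List Int) : cc (0 :: l) = cc l := by
  cases l with
  | nil => simp [cc]
  | cons b t => simp [cc]

-- ===== VERDICT (by name: the statement is the Claim_ definition above) =====
theorem zero_crossings_spec : Claim_equal_zero_crossings := by
  intro data median _
  unfold Spec_zero_crossings zero_crossings zero_crossings_alt
  rw [a_fold_eq_cc median data 0 0 (Or.inr (Or.inl rfl)), b_fold_eq_cc]
  simp [cc_zero_cons]
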